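-- pv_equiv track=rewrite | github.com/vm6502q/pyqrack-examples | qec/mirror_rcs_nn_ace.py | factor_width
-- ===== SOURCE A (Python) =====
-- import math
--
-- def factor_width(width):
--     col_len = math.floor(math.sqrt(width))
--     while ((width // col_len) * col_len) != width:
--         col_len -= 1
--     if col_len == 1:
--         raise Exception("ERROR: Can't simulate prime number width!")
--     row_len = width // col_len
--
--     return row_len, col_len
-- ===== SOURCE B (Python) =====
-- import math
--
-- def factor_width(width):
--     # ascending bounded scan: the last divisor found in 1..isqrt(width)
--     # is the largest divisor of width not exceeding sqrt(width)
--     col_len = 1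
--     for i in range(1, math.isqrt(width) + 1):
--         if width % i == 0:
--             col_len = i
--     if col_len == 1:
--         raise Exception("ERROR: Can't simulate prime number width!")
--     return width // col_len, col_len
-- ===== Notes on version B (the rewrite author's own statement) =====
-- stated objective: simpler
-- what changed: replaces the unbounded descending while-loop starting at floor(sqrt(width)) with a bounded ascending for-loop over range(1, isqrt(width)+1) that records the last divisor seen
import Mathlib
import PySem

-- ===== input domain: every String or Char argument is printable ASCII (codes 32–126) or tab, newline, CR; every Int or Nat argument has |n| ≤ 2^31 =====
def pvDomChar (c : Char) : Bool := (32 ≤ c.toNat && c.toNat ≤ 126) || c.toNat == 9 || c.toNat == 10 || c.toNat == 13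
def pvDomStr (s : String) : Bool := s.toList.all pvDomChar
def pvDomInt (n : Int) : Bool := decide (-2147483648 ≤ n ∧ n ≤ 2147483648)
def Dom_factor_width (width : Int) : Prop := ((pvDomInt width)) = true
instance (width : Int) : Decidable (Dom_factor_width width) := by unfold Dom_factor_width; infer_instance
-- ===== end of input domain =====

-- B replaces A's unbounded descending while-loop with a bounded ascending for-loop
-- recording the last divisor in 1..isqrt(width); objective: simpler.

-- ===== PORT A =====
-- the descending 'while ((width // col_len) * col_len) != width: col_len -= 1' loop;
-- fuel is col_len itself (it only decreases); at col_len = 0 Python raises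
-- ZeroDivisionError, excluded by Pre_, junk value 0 returned there.
def factorWidthWhile (width : Int) : Nat → Nat
  | 0 => 0
  | c + 1 =>
    if PySem.Int.floordiv width ((c : Int) + 1) * ((c : Int) + 1) = width then c + 1
    else factorWidthWhile width c

-- math.floor(math.sqrt(width)) is exact on Dom (0 ≤ width ≤ 2^31 fits a double);
-- negative width raises ValueError in Python, excluded by Pre_.
def factor_width (width : Int) : Int × Int :=
  let col_len : Nat := factorWidthWhile width width.toNat.sqrt
  if col_len = 1 then (0, 0)  -- Python raises the prime-width Exception here; excluded by Pre_
  else (PySem.Int.floordiv width (col_len : Int), (col_len : Int))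

-- ===== PORT B =====
def factor_width_alt (width : Int) : Int × Int :=
  -- for i in range(1, math.isqrt(width) + 1): if width % i == 0: col_len = i
  let col_len : Int :=
    (PySem.List.pyRange 1 ((width.toNat.sqrt : Int) + 1) 1).foldl
      (fun acc i => if PySem.Int.mod width i = 0 then i else acc) 1
  if col_len = 1 then (0, 0)  -- Python raises the prime-width Exception here; excluded by Pre_
  else (PySem.Int.floordiv width col_len, col_len)

-- ===== PRECONDITION & SPEC =====
-- exactly where Python A returns normally: on negative width math.sqrt raises, on zero
-- width the descending loop hits division by zero, and on prime or too-small width A's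
-- explicit prime-width Exception fires; so A returns on composite widths of at least four.
def Pre_factor_width (width : Int) : Prop := 4 ≤ width ∧ ¬ Nat.Prime width.toNat
instance (width : Int) : Decidable (Pre_factor_width width) := by unfold Pre_factor_width; infer_instance
def pvWitness_factor_width : Int := (6)

def Spec_factor_width (width : Int) (out : Int × Int) : Prop := out = factor_width_alt width
instance (width : Int) (out : Int × Int) : Decidable (Spec_factor_width width out) := by unfold Spec_factor_width; infer_instance

-- ===== CLAIM (what is proved, stated in full; the proofs are below) =====
def Claim_equal_factor_width : Prop := ∀ (width : Int), Dom_factor_width width → Pre_factor_width width → Spec_factor_width width (factor_width width)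

-- ===== LEMMAS AND PROOFS =====

-- for a positive divisor, A's test 'width // d * d = width' is B's 'width % d = 0'
theorem cond_equiv (width : Int) (d : Int) (_hd : 0 < d) :
    (PySem.Int.floordiv width d * d = width) ↔ PySem.Int.mod width d = 0 := by
  have h := PySem.Int.floordiv_mul_add_mod width d
  omega

-- the two loops compute the same value for any fuel s ≥ 1
theorem loop_eq (width : Int) : ∀ (s : Nat), 1 ≤ s →
    ((factorWidthWhile width s : Nat) : Int) =
      (PySem.List.pyRange 1 ((s : Int) + 1) 1).foldl
        (fun acc i => if PySem.Int.mod width i = 0 then i else acc) 1 := by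
  intro s
  induction s with
  | zero => intro h; omega
  | succ t ih =>
    intro _
    have hsplit : PySem.List.pyRange 1 ((t : Int) + 1 + 1) 1
        = PySem.List.pyRange 1 ((t : Int) + 1) 1 ++ [((t : Int) + 1)] := by
      have := PySem.List.pyRange_one_succ_right (a := 1) (b := (t : Int) + 1) (by omega)
      simpa using this
    rw [show ((Nat.succ t : Nat) : Int) + 1 = (t : Int) + 1 + 1 by push_cast; ring, hsplit,
      List.foldl_append]
    simp only [List.foldl]
    by_cases hdiv : PySem.Int.mod width ((t : Int) + 1) = 0
    · have hcond : PySem.Int.floordiv width ((t : Int) + 1) * ((t : Int) + 1) = width :=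
        (cond_equiv width ((t : Int) + 1) (by omega)).mpr hdiv
      rw [if_pos hdiv]
      simp only [factorWidthWhile]
      rw [if_pos hcond]
      push_cast; ring
    · have hcond : ¬ (PySem.Int.floordiv width ((t : Int) + 1) * ((t : Int) + 1) = width) := by
        intro h; exact hdiv ((cond_equiv width ((t : Int) + 1) (by omega)).mp h)
      rcases Nat.eq_zero_or_pos t with ht0 | htpos
      · -- t = 0 : divisor is 1, width % 1 = 0 always, contradiction
        subst ht0
        exact absurd (by
          have hf := PySem.Int.mod_eq_emod_of_pos (a := width) (b := 1) (by omega)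
          push_cast
          simp [hf]) hdiv
      · rw [if_neg hdiv]
        simp only [factorWidthWhile]
        rw [if_neg hcond]
        exact ih htpos

-- ===== VERDICT (by name: the statement is the Claim_ definition above) =====
theorem factor_width_spec : Claim_equal_factor_width := by
  intro width _ hpre
  unfold Spec_factor_width factor_width factor_width_alt
  have hw4 : (4 : Int) ≤ width := hpre.1
  have hs1 : 1 ≤ width.toNat.sqrt := by
    have : 4 ≤ width.toNat := by omega
    have := Nat.sqrt_le_sqrt this
    simpa using this.trans' (by norm_num)
  have h := loop_eq width width.toNat.sqrt hs1
  simp only [← h]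
  rcases Nat.eq_zero_or_pos (factorWidthWhile width width.toNat.sqrt) with h0 | _
  · simp [h0]
  · by_cases h1 : factorWidthWhile width width.toNat.sqrt = 1
    · simp [h1]
    · have h1' : ((factorWidthWhile width width.toNat.sqrt : Nat) : Int) ≠ 1 := by
        exact_mod_cast fun hc => h1 (by exact_mod_cast hc)
      simp [h1, h1']
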